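-- pv_equiv track=rewrite | github.com/PouchyCorp/Expose-SVT | dialogue.py | crop_parsed_text
-- ===== SOURCE A (Python) =====
-- def crop_parsed_text(parse_text : list[list[str, int]], start : int, stop) -> list[list[str, int]]:
--     """
--     Crop the parsed text to fit the size.
--     """
--     cropped_text = []
--
--     stop -= start  # Adjust stop to account for the starting position
--
--     shortened_parse_text = []
--     for segment in parse_text:
--         if len(segment[0]) > start:
--             shortened_parse_text.append([segment[0][start:], segment[1]])
--             start = 0
--         elif start > 0:
--             start = start - len(segment[0])
--         else:
--             shortened_parse_text.append(segment)
--
--     for segment in shortened_parse_text: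
--         if len(segment[0]) >= stop:
--             cropped_text.append([segment[0][:stop+1], segment[1]])
--             break
--         else:
--             cropped_text.append(segment)
--             stop -= len(segment[0])
--
--     return cropped_text
-- ===== SOURCE B (Python) =====
-- def crop_parsed_text(parse_text : list[list[str, int]], start : int, stop) -> list[list[str, int]]:
--     """
--     Crop the parsed text to fit the size.
--
--     One pass over the segments with an absolute character offset: a segment is
--     kept once it reaches the skip point; the first kept segment is sliced at the
--     head, and the pass stops at the segment that absorbs the remaining length.
--     """
--     keep = stop - start
--     cropped_text = []
--     used = 0   # characters already kept
--     off = 0    # absolute character offset of the current segment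
--     for text, value in parse_text:
--         end = off + len(text)
--         if end > start or off >= start:
--             piece = text[max(start - off, 0):]
--             if len(piece) >= keep - used:
--                 cropped_text.append([piece[:keep - used + 1], value])
--                 break
--             cropped_text.append([piece, value])
--             used += len(piece)
--         off = end
--     return cropped_text
-- ===== Notes on version B (the rewrite author's own statement) =====
-- stated objective: alternative
-- what changed: Replaces A's two sequential state-mutating loops (skip-rebuild then truncate-rebuild) by one pass that tracks an absolute character offset, selecting and slicing segments directly; Pre_ restricts to the natural domain start >= 0, excluding negative skip counts on which A's tail-slice value is an accident of Python's negative slicing.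
-- outside the precondition, e.g. on crop_parsed_text([('abc', 1)], -1, 2): A returns [('c', 1)], B returns [('abc', 1)]
import Mathlib
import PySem

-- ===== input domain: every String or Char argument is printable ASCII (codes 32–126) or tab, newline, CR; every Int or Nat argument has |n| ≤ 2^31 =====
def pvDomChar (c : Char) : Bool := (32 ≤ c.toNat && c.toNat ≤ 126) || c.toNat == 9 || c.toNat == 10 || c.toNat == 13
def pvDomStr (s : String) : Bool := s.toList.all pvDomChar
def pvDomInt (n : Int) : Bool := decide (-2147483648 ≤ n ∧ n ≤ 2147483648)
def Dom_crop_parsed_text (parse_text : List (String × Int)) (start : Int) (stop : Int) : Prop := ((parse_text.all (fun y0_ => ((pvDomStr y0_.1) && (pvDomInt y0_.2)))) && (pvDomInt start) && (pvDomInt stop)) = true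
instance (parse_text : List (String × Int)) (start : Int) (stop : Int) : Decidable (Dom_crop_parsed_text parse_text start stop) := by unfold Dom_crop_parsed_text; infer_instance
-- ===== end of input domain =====

-- B replaces A's two sequential state-mutating loops (skip-rebuild then truncate-rebuild)
-- by a single pass tracking an absolute character offset (objective: alternative).

-- ===== PORT A =====
-- first loop of A: skip `start` characters, mutating `start` as it goes
def pvShortenA : List (String × Int) → Int → List (String × Int)
  | [], _ => []
  | (s, v) :: rest, start =>
    if PySem.Str.len s > start then
      (PySem.Str.slice s (some start) none, v) :: pvShortenA rest 0
    else if start > 0 then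
      pvShortenA rest (start - PySem.Str.len s)
    else
      (s, v) :: pvShortenA rest start

-- second loop of A: keep `stop` characters (with A's `stop+1` slice at the break)
def pvCropLoopA : List (String × Int) → Int → List (String × Int)
  | [], _ => []
  | (s, v) :: rest, stop =>
    if PySem.Str.len s ≥ stop then
      [(PySem.Str.slice s none (some (stop + 1)), v)]
    else
      (s, v) :: pvCropLoopA rest (stop - PySem.Str.len s)

def crop_parsed_text (parse_text : List (String × Int)) (start : Int) (stop : Int) : List (String × Int) :=
  pvCropLoopA (pvShortenA parse_text start) (stop - start)

-- ===== PORT B =====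
-- Source B's single for-loop: state (used, off); early `break` becomes the singleton result
def pvCropB : List (String × Int) → Int → Int → Int → Int → List (String × Int)
  | [], _, _, _, _ => []
  | (s, v) :: rest, start, keep, used, off =>
    let nd := off + PySem.Str.len s
    if nd > start ∨ off ≥ start then
      let piece := PySem.Str.slice s (some (max (start - off) 0)) none
      if PySem.Str.len piece ≥ keep - used then
        [(PySem.Str.slice piece none (some (keep - used + 1)), v)]
      else
        (piece, v) :: pvCropB rest start keep (used + PySem.Str.len piece) nd
    else
      pvCropB rest start keep used nd

def crop_parsed_text_alt (parse_text : List (String × Int)) (start : Int) (stop : Int) : List (String × Int) :=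
  pvCropB parse_text start (stop - start) 0 0

-- ===== PRECONDITION & SPEC =====
-- Pre_ restricts to the natural domain of a crop, a nonnegative skip count: A still
-- returns on start < 0, but its value there (a Python negative slice taking characters
-- from the END of the first segment) is an accident of A's implementation.
def Pre_crop_parsed_text (parse_text : List (String × Int)) (start : Int) (stop : Int) : Prop := 0 ≤ start
instance (parse_text : List (String × Int)) (start : Int) (stop : Int) : Decidable (Pre_crop_parsed_text parse_text start stop) := by unfold Pre_crop_parsed_text; infer_instance
def pvWitness_crop_parsed_text : (List (String × Int)) × Int × Int := ([("ab", 1), ("cde", 2)], 1, 3)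

def Spec_crop_parsed_text (parse_text : List (String × Int)) (start : Int) (stop : Int) (out : List (String × Int)) : Prop := out = crop_parsed_text_alt parse_text start stop
instance (parse_text : List (String × Int)) (start : Int) (stop : Int) (out : List (String × Int)) : Decidable (Spec_crop_parsed_text parse_text start stop out) := by unfold Spec_crop_parsed_text; infer_instance

-- ===== CLAIM (what is proved, stated in full; the proofs are below) =====
def Claim_equal_crop_parsed_text : Prop := ∀ (parse_text : List (String × Int)) (start : Int) (stop : Int), Dom_crop_parsed_text parse_text start stop → Pre_crop_parsed_text parse_text start stop → Spec_crop_parsed_text parse_text start stop (crop_parsed_text parse_text start stop)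

-- ===== LEMMAS AND PROOFS =====

-- Python s[0:] is s
lemma pvSlice_zero (s : String) : PySem.Str.slice s (some 0) none = s := by
  have h : (PySem.Str.slice s (some 0) none).toList = s.toList := by
    simp [PySem.Str.toList_slice, PySem.Chars.slice_eq_listSlice]
  exact String.toList_inj.mp h

-- A's first loop with a zero skip keeps every segment unchanged
lemma pvShortenA_zero (lst : List (String × Int)) : pvShortenA lst 0 = lst := by
  induction lst with
  | nil => rfl
  | cons hd tl ih =>
    obtain ⟨s, v⟩ := hd
    simp only [pvShortenA]
    split_ifs with h1 h2
    · rw [pvSlice_zero, ih]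
    · exact absurd h2 (lt_irrefl 0)
    · rw [ih]

-- main invariant: B's one-pass loop equals A's two loops with the residual
-- skip max(start - off, 0) and the residual keep length keep - used
lemma pvCropB_eq (lst : List (String × Int)) : ∀ keep start used off : Int,
    pvCropB lst start keep used off =
      pvCropLoopA (pvShortenA lst (max (start - off) 0)) (keep - used) := by
  intro keep start
  induction lst with
  | nil => intro used off; rfl
  | cons hd tl ih =>
    intro used off
    obtain ⟨s, v⟩ := hd
    have hlen : 0 ≤ PySem.Str.len s := by
      rw [PySem.Str.len_eq]; exact Int.natCast_nonneg _
    simp only [pvCropB]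
    by_cases hc : off + PySem.Str.len s > start ∨ off ≥ start
    · rw [if_pos hc]
      -- the shortened list starts with the head piece
      have hshort : pvShortenA ((s, v) :: tl) (max (start - off) 0) =
          (PySem.Str.slice s (some (max (start - off) 0)) none, v) :: tl := by
        by_cases hL : PySem.Str.len s > max (start - off) 0
        · simp only [pvShortenA]
          rw [if_pos hL, pvShortenA_zero]
        · -- then off ≥ start, so the residual skip is 0 and the segment is empty
          have h0 : max (start - off) 0 = 0 := by
            rcases hc with h | h
            · omega
            · omega
          have hL0 : PySem.Str.len s = 0 := by omega
          rw [h0, pvSlice_zero]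
          simp only [pvShortenA]
          rw [if_neg (by omega), if_neg (lt_irrefl 0), pvShortenA_zero]
      rw [hshort]
      simp only [pvCropLoopA]
      set piece := PySem.Str.slice s (some (max (start - off) 0)) none with hp
      by_cases hk : PySem.Str.len piece ≥ keep - used
      · rw [if_pos hk, if_pos hk]
      · rw [if_neg hk, if_neg hk]
        have h0 : max (start - (off + PySem.Str.len s)) 0 = 0 := by
          rcases hc with h | h <;> omega
        rw [ih (used + PySem.Str.len piece) (off + PySem.Str.len s), h0, pvShortenA_zero,
            show keep - (used + PySem.Str.len piece) = keep - used - PySem.Str.len piece from by ring]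
    · rw [if_neg hc]
      rw [not_or, not_lt, not_le] at hc
      obtain ⟨h1, h2⟩ := hc
      -- segment entirely skipped: residual skip decreases by its length
      have hstep : pvShortenA ((s, v) :: tl) (max (start - off) 0) =
          pvShortenA tl (max (start - off) 0 - PySem.Str.len s) := by
        simp only [pvShortenA]
        rw [if_neg (by omega), if_pos (by omega)]
      rw [hstep, ih used (off + PySem.Str.len s)]
      congr 2
      omega

-- ===== VERDICT (by name: the statement is the Claim_ definition above) =====
theorem crop_parsed_text_spec : Claim_equal_crop_parsed_text := by
  intro pt start stop _ hpre
  unfold Spec_crop_parsed_text crop_parsed_text crop_parsed_text_alt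
  rw [pvCropB_eq pt (stop - start) start 0 0, sub_zero, sub_zero,
      max_eq_left (by exact hpre)]
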